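-- pv_equiv track=rewrite | github.com/lassemand/rsafactor | factorizer/quadratic_sieve/rsa_quadratic_sieve.py | subtract_partial_relation_exponents
-- ===== SOURCE A (Python) =====
-- def subtract_partial_relation_exponents(partial_relation_1, partial_relation_2):
--     counter_1 = 0
--     counter_2 = 0
--     new_relation = []
--     while counter_1 != len(partial_relation_1) or counter_2 != len(partial_relation_2):
--         if (counter_2 != len(partial_relation_2)) and (counter_1 == len(partial_relation_1) or partial_relation_1[counter_1][0] > partial_relation_2[counter_2][0]):
--             saved_result = (partial_relation_2[counter_2][0], -partial_relation_2[counter_2][1])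
--             counter_2 += 1
--         elif (counter_1 != len(partial_relation_1)) and (counter_2 == len(partial_relation_2) or partial_relation_2[counter_2][0] > partial_relation_1[counter_1][0]):
--             saved_result = (partial_relation_1[counter_1][0], partial_relation_1[counter_1][1])
--             counter_1 += 1
--         elif partial_relation_1[counter_1][0] == partial_relation_2[counter_2][0]:
--             result = partial_relation_1[counter_1][1] - partial_relation_2[counter_2][1]
--             saved_result = (partial_relation_1[counter_1][0], result)
--             counter_1 += 1
--             counter_2 += 1
--             if result == 0:
--                 continue
--         new_relation.append(saved_result)
--     return new_relation
-- ===== SOURCE B (Python) =====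
-- def subtract_partial_relation_exponents(partial_relation_1, partial_relation_2):
--     if not partial_relation_1:
--         return [(prime, -exponent) for prime, exponent in partial_relation_2]
--     if not partial_relation_2:
--         return [(prime, exponent) for prime, exponent in partial_relation_1]
--     (prime_1, exponent_1), (prime_2, exponent_2) = partial_relation_1[0], partial_relation_2[0]
--     if prime_1 > prime_2:
--         return [(prime_2, -exponent_2)] + subtract_partial_relation_exponents(partial_relation_1, partial_relation_2[1:])
--     if prime_2 > prime_1:
--         return [(prime_1, exponent_1)] + subtract_partial_relation_exponents(partial_relation_1[1:], partial_relation_2)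
--     rest = subtract_partial_relation_exponents(partial_relation_1[1:], partial_relation_2[1:])
--     return rest if exponent_1 == exponent_2 else [(prime_1, exponent_1 - exponent_2)] + rest
-- ===== Notes on version B (the rewrite author's own statement) =====
-- stated objective: simpler
-- what changed: Re-decomposes the merge as a direct structural recursion on the two lists: comprehension base cases, head comparison, and the output built by cons/concatenation of the recursive result, instead of A's while loop over two index counters with len() guards, a shared saved_result variable, an accumulator list and a continue to skip zero differences.
import Mathlib
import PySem

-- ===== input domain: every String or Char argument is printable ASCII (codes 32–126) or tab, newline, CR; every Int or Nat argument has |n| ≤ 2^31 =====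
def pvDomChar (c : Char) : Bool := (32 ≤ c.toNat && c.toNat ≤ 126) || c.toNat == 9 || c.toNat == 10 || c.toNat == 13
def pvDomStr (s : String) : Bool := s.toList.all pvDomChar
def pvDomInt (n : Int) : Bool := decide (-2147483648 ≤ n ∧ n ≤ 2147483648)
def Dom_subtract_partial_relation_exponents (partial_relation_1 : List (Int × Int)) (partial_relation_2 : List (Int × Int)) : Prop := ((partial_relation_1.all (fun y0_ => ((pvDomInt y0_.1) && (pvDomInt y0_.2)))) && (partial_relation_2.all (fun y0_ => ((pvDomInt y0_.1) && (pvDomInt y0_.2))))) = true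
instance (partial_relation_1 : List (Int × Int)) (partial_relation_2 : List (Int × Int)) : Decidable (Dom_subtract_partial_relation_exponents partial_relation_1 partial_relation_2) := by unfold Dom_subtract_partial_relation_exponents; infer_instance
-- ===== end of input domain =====

-- B re-decomposes A's two-counter while-loop merge as a direct structural recursion on the
-- two lists (comprehension base cases, output built by cons of the recursive result) — simpler.

-- ===== PORT A =====
-- A's while loop over the counters, ported as recursion on the remaining suffixes
-- (counter_i != len ↔ suffix ≠ [], partial_relation_i[counter_i] ↔ suffix head);
-- same guards in the same order, same appends to new_relation (the accumulator).
def pvLoopA (r1 r2 acc : List (Int × Int)) : List (Int × Int) :=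
  if h0 : r1 = [] ∧ r2 = [] then acc
  else if h2 : r2 ≠ [] ∧ (r1 = [] ∨ (r1.headD (0, 0)).1 > (r2.headD (0, 0)).1) then
    pvLoopA r1 r2.tail (acc ++ [((r2.headD (0, 0)).1, -(r2.headD (0, 0)).2)])
  else if h1 : r1 ≠ [] ∧ (r2 = [] ∨ (r2.headD (0, 0)).1 > (r1.headD (0, 0)).1) then
    pvLoopA r1.tail r2 (acc ++ [r1.headD (0, 0)])
  else if (r1.headD (0, 0)).1 = (r2.headD (0, 0)).1 then
    (if (r1.headD (0, 0)).2 - (r2.headD (0, 0)).2 = 0 then pvLoopA r1.tail r2.tail acc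
     else pvLoopA r1.tail r2.tail (acc ++ [((r1.headD (0, 0)).1, (r1.headD (0, 0)).2 - (r2.headD (0, 0)).2)]))
  else acc  -- unreachable: with both suffixes nonempty the three guards are exhaustive
termination_by r1.length + r2.length
decreasing_by
  · have := List.length_pos_iff.mpr h2.1
    simp [List.length_tail]; omega
  · have := List.length_pos_iff.mpr h1.1
    simp [List.length_tail]; omega
  · have hne : r1 ≠ [] ∧ r2 ≠ [] := by
      constructor
      · intro h; exact h2 ⟨fun h' => h0 ⟨h, h'⟩, Or.inl h⟩
      · intro h; exact h1 ⟨fun h' => h0 ⟨h', h⟩, Or.inl h⟩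
    have := List.length_pos_iff.mpr hne.1
    have := List.length_pos_iff.mpr hne.2
    simp [List.length_tail]; omega
  · have hne : r1 ≠ [] ∧ r2 ≠ [] := by
      constructor
      · intro h; exact h2 ⟨fun h' => h0 ⟨h, h'⟩, Or.inl h⟩
      · intro h; exact h1 ⟨fun h' => h0 ⟨h', h⟩, Or.inl h⟩
    have := List.length_pos_iff.mpr hne.1
    have := List.length_pos_iff.mpr hne.2
    simp [List.length_tail]; omega

def subtract_partial_relation_exponents (partial_relation_1 : List (Int × Int)) (partial_relation_2 : List (Int × Int)) : List (Int × Int) :=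
  pvLoopA partial_relation_1 partial_relation_2 []

-- ===== PORT B =====
-- Source B's structural recursion: the comprehension base cases become List.map, xs[1:] becomes
-- the tail pattern, '[x] + rest' becomes cons.
def subtract_partial_relation_exponents_alt (partial_relation_1 : List (Int × Int)) (partial_relation_2 : List (Int × Int)) : List (Int × Int) :=
  match partial_relation_1, partial_relation_2 with
  | [], p2 => p2.map (fun q => (q.1, -q.2))
  | p1, [] => p1.map (fun q => (q.1, q.2))
  | (prime_1, exponent_1) :: t1, (prime_2, exponent_2) :: t2 =>
    if prime_1 > prime_2 then
      (prime_2, -exponent_2) :: subtract_partial_relation_exponents_alt ((prime_1, exponent_1) :: t1) t2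
    else if prime_2 > prime_1 then
      (prime_1, exponent_1) :: subtract_partial_relation_exponents_alt t1 ((prime_2, exponent_2) :: t2)
    else
      let rest := subtract_partial_relation_exponents_alt t1 t2
      if exponent_1 = exponent_2 then rest else (prime_1, exponent_1 - exponent_2) :: rest
termination_by partial_relation_1.length + partial_relation_2.length
decreasing_by all_goals (simp; try omega)

-- ===== PRECONDITION & SPEC =====
def Spec_subtract_partial_relation_exponents (partial_relation_1 : List (Int × Int)) (partial_relation_2 : List (Int × Int)) (out : List (Int × Int)) : Prop := out = subtract_partial_relation_exponents_alt partial_relation_1 partial_relation_2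
instance (partial_relation_1 : List (Int × Int)) (partial_relation_2 : List (Int × Int)) (out : List (Int × Int)) : Decidable (Spec_subtract_partial_relation_exponents partial_relation_1 partial_relation_2 out) := by unfold Spec_subtract_partial_relation_exponents; infer_instance

-- ===== CLAIM =====
def Claim_equal_subtract_partial_relation_exponents : Prop := ∀ (partial_relation_1 : List (Int × Int)) (partial_relation_2 : List (Int × Int)), Dom_subtract_partial_relation_exponents partial_relation_1 partial_relation_2 → Spec_subtract_partial_relation_exponents partial_relation_1 partial_relation_2 (subtract_partial_relation_exponents partial_relation_1 partial_relation_2)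

-- ===== LEMMAS AND PROOFS =====

lemma alt_nil_right (r : List (Int × Int)) : subtract_partial_relation_exponents_alt r [] = r := by
  cases r <;> simp [subtract_partial_relation_exponents_alt]

lemma pvLoopA_eq (r1 r2 acc : List (Int × Int)) :
    pvLoopA r1 r2 acc = acc ++ subtract_partial_relation_exponents_alt r1 r2 := by
  fun_induction pvLoopA r1 r2 acc with
  | case1 r1 r2 acc h0 =>
      obtain ⟨rfl, rfl⟩ := h0; simp [subtract_partial_relation_exponents_alt]
  | case2 r1 r2 acc h0 h2 ih =>
      obtain ⟨hne2, hc⟩ := h2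
      obtain ⟨⟨k2, v2⟩, t2, rfl⟩ := List.exists_cons_of_ne_nil hne2
      rw [ih]
      rcases r1 with _ | ⟨⟨k1, v1⟩, t1⟩
      · simp [subtract_partial_relation_exponents_alt]
      · have hgt : k1 > k2 := by
          rcases hc with h | h
          · exact absurd h (by simp)
          · simpa using h
        simp [subtract_partial_relation_exponents_alt, hgt]
  | case3 r1 r2 acc h0 h2 h1 ih =>
      obtain ⟨hne1, hc⟩ := h1
      obtain ⟨⟨k1, v1⟩, t1, rfl⟩ := List.exists_cons_of_ne_nil hne1
      rw [ih]
      rcases r2 with _ | ⟨⟨k2, v2⟩, t2⟩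
      · simp [alt_nil_right]
      · have hgt : k2 > k1 := by
          rcases hc with h | h
          · exact absurd h (by simp)
          · simpa using h
        have hn : ¬ k1 > k2 := by omega
        simp [subtract_partial_relation_exponents_alt, hgt, hn]
  | case4 r1 r2 acc h0 h2 h1 heq hz ih =>
      have hne1 : r1 ≠ [] := fun h => h2 ⟨fun h' => h0 ⟨h, h'⟩, Or.inl h⟩
      have hne2 : r2 ≠ [] := fun h => h1 ⟨hne1, Or.inl h⟩
      obtain ⟨⟨k1, v1⟩, t1, rfl⟩ := List.exists_cons_of_ne_nil hne1
      obtain ⟨⟨k2, v2⟩, t2, rfl⟩ := List.exists_cons_of_ne_nil hne2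
      rw [ih]
      simp only [List.headD_cons] at heq hz
      subst heq
      have hv : v1 = v2 := by omega
      simp [subtract_partial_relation_exponents_alt, hv]
  | case5 r1 r2 acc h0 h2 h1 heq hz ih =>
      have hne1 : r1 ≠ [] := fun h => h2 ⟨fun h' => h0 ⟨h, h'⟩, Or.inl h⟩
      have hne2 : r2 ≠ [] := fun h => h1 ⟨hne1, Or.inl h⟩
      obtain ⟨⟨k1, v1⟩, t1, rfl⟩ := List.exists_cons_of_ne_nil hne1
      obtain ⟨⟨k2, v2⟩, t2, rfl⟩ := List.exists_cons_of_ne_nil hne2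
      rw [ih]
      simp only [List.headD_cons] at heq hz
      subst heq
      have hv : ¬ v1 = v2 := by omega
      simp [subtract_partial_relation_exponents_alt, hv]
  | case6 r1 r2 acc h0 h2 h1 hne =>
      exfalso
      have hne1 : r1 ≠ [] := fun h => h2 ⟨fun h' => h0 ⟨h, h'⟩, Or.inl h⟩
      have hne2 : r2 ≠ [] := fun h => h1 ⟨hne1, Or.inl h⟩
      obtain ⟨⟨k1, v1⟩, t1, rfl⟩ := List.exists_cons_of_ne_nil hne1
      obtain ⟨⟨k2, v2⟩, t2, rfl⟩ := List.exists_cons_of_ne_nil hne2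
      simp only [List.headD_cons] at h2 h1 hne
      simp at h2 h1
      omega

-- ===== VERDICT (by name: the statement is the Claim_ definition above) =====
theorem subtract_partial_relation_exponents_spec : Claim_equal_subtract_partial_relation_exponents := by
  intro p1 p2 _hDom
  unfold Spec_subtract_partial_relation_exponents subtract_partial_relation_exponents
  rw [pvLoopA_eq]
  rfl
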